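-- pv_equiv track=rewrite | github.com/UNSW-database/simd_set_operations | scripts/results/plot.py | algorithm_label
-- ===== SOURCE A (Python) =====
-- SCALAR_ALGORITHMS = {
--     "naive_merge": "Merge (branch)",
--     "branchless_merge": "Merge (branchless)",
-- }
--
-- VECTOR_ALGORITHMS = {
--     "qfilter": "QFilter",
--     "qfilter_c": "QFilter (FFI)",
--     "bmiss": "BMiss",
--     "bmiss_sttni": "BMiss STTNI",
--     "shuffling_sse": "Shuffling SSE",
--     "shuffling_avx2": "Shuffling AVX2",
--     "shuffling_avx512": "Shuffling AVX512",
--     "broadcast_sse": "Broadcast SSE",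
--     "broadcast_avx2": "Broadcast AVX2",
--     "broadcast_avx512": "Broadcast AVX512",
--     "vp2intersect_emulation": "VP2INT. Emul.",
--     "croaring": "C Roaring",
--     "lbk_v3_sse": "LBK v3 SSE",
--     "lbk_v3_avx2": "LBK v3 AVX2",
--     "lbk_v3_avx512": "LBK v3 AVX512",
--     "lbk_v1x4_sse": "LBK v1 x4 SSE",
--     "lbk_v1x8_sse": "LBK v1 x8 SSE",
--     "lbk_v1x8_avx2": "LBK v1 x8 AVX2",
--     "lbk_v1x16_avx2": "LBK v1 x16 AVX2",
--     "lbk_v1x16_avx512": "LBK v1 x16 AVX512",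
--     "lbk_v1x32_avx512": "LBK v1 x32 AVX512",
--     "galloping": "Galloping",
--     "galloping_sse": "Galloping SSE",
--     "galloping_avx2": "Galloping AVX2",
--     "galloping_avx512": "Galloping AVX512",
-- }
--
-- SAVE_TYPE = {
--     "_count": "count",
--     "_lut": "lookup",
--     "_comp": "compress",
-- }
--
-- NO_SAVE = [
--     "merge",
--     "bmiss",
--     "galloping",
--     "lbk",
--     "croaring",
-- ]
--
-- NO_BRANCH = [
--     "merge",
--     "galloping",
--     "lbk",
--     "croaring",
-- ]
--
-- def algorithm_label(alg, label="", has_branch=False):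
--
--     scalar = SCALAR_ALGORITHMS.get(alg)
--     if scalar is not None:
--         return scalar + label
--
--     vector = VECTOR_ALGORITHMS.get(alg)
--     if vector is not None:
--         if not has_branch and not any(x in alg for x in NO_BRANCH):
--             label = " (branchless)" + label
--         return vector + label
--
--     for postfix, tag in SAVE_TYPE.items():
--         if alg.endswith(postfix):
--             rest = alg[:-len(postfix)]
--             tagged = f" ({tag})" + label if not any(x in alg for x in NO_SAVE) else label
--             return algorithm_label(rest, tagged, has_branch)
--
--     if alg.endswith("_br"):
--         return algorithm_label(alg[:-3], " (branch)" + label, True)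
--
--     if alg.endswith("_bsr"):
--         if not has_branch and not any(x in alg for x in NO_BRANCH):
--             label = " (branchless)" + label
--         return algorithm_label(alg[:-4], " BSR" + label, True)
--
--     return f"FAIL: {alg}{label}"
-- ===== SOURCE B (Python) =====
-- SCALAR_ALGORITHMS = {
--     "naive_merge": "Merge (branch)",
--     "branchless_merge": "Merge (branchless)",
-- }
--
-- VECTOR_ALGORITHMS = {
--     "qfilter": "QFilter",
--     "qfilter_c": "QFilter (FFI)",
--     "bmiss": "BMiss",
--     "bmiss_sttni": "BMiss STTNI",
--     "shuffling_sse": "Shuffling SSE",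
--     "shuffling_avx2": "Shuffling AVX2",
--     "shuffling_avx512": "Shuffling AVX512",
--     "broadcast_sse": "Broadcast SSE",
--     "broadcast_avx2": "Broadcast AVX2",
--     "broadcast_avx512": "Broadcast AVX512",
--     "vp2intersect_emulation": "VP2INT. Emul.",
--     "croaring": "C Roaring",
--     "lbk_v3_sse": "LBK v3 SSE",
--     "lbk_v3_avx2": "LBK v3 AVX2",
--     "lbk_v3_avx512": "LBK v3 AVX512",
--     "lbk_v1x4_sse": "LBK v1 x4 SSE",
--     "lbk_v1x8_sse": "LBK v1 x8 SSE",
--     "lbk_v1x8_avx2": "LBK v1 x8 AVX2",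
--     "lbk_v1x16_avx2": "LBK v1 x16 AVX2",
--     "lbk_v1x16_avx512": "LBK v1 x16 AVX512",
--     "lbk_v1x32_avx512": "LBK v1 x32 AVX512",
--     "galloping": "Galloping",
--     "galloping_sse": "Galloping SSE",
--     "galloping_avx2": "Galloping AVX2",
--     "galloping_avx512": "Galloping AVX512",
-- }
--
-- SAVE_TYPE = {
--     "_count": "count",
--     "_lut": "lookup",
--     "_comp": "compress",
-- }
--
-- NO_SAVE = ["merge", "bmiss", "galloping", "lbk", "croaring"]
--
-- NO_BRANCH = ["merge", "galloping", "lbk", "croaring"]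
--
--
-- def algorithm_label(alg, label="", has_branch=False):
--     # Membership flags are computed ONCE, on the original string: the NO_SAVE /
--     # NO_BRANCH words contain no '_', every strippable suffix starts with '_'
--     # and contains none of the words, so stripping a suffix never changes them.
--     no_save = any(x in alg for x in NO_SAVE)
--     no_branch = any(x in alg for x in NO_BRANCH)
--
--     # Phase 1: strip suffixes right-to-left, only recording what was stripped.
--     events = []
--     while alg not in SCALAR_ALGORITHMS and alg not in VECTOR_ALGORITHMS:
--         sfx = next((p for p in SAVE_TYPE if alg.endswith(p)), None)
--         if sfx is not None:
--             events.append(('save', SAVE_TYPE[sfx]))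
--             alg = alg[:-len(sfx)]
--         elif alg.endswith("_br"):
--             events.append(('br', None))
--             alg = alg[:-3]
--         elif alg.endswith("_bsr"):
--             events.append(('bsr', None))
--             alg = alg[:-4]
--         else:
--             break
--
--     # Phase 2: replay the events to collect label fragments and the branch flag.
--     frags = []
--     for kind, tag in events:
--         if kind == 'save':
--             if not no_save:
--                 frags.append(f" ({tag})")
--         elif kind == 'br':
--             frags.append(" (branch)")
--             has_branch = True
--         else:  # 'bsr'
--             if not has_branch and not no_branch:
--                 frags.append(" (branchless)")
--             frags.append(" BSR")
--             has_branch = True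
--
--     # Phase 3: assemble the final label.
--     joined = "".join(reversed(frags)) + label
--     if alg in SCALAR_ALGORITHMS:
--         return SCALAR_ALGORITHMS[alg] + joined
--     if alg in VECTOR_ALGORITHMS:
--         pre = " (branchless)" if not has_branch and not no_branch else ""
--         return VECTOR_ALGORITHMS[alg] + pre + joined
--     return f"FAIL: {alg}" + joined
-- ===== Notes on version B (the rewrite author's own statement) =====
-- stated objective: alternative
-- what changed: Replaces A's label-threading tail recursion by a staged pipeline: the NO_SAVE/NO_BRANCH membership flags are computed once up front (stripping a '_'-led suffix can never change them since the words contain no '_'), one loop only strips suffixes recording events, a second fold replays the events into label fragments, and the output is assembled at the end.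
import Mathlib
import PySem

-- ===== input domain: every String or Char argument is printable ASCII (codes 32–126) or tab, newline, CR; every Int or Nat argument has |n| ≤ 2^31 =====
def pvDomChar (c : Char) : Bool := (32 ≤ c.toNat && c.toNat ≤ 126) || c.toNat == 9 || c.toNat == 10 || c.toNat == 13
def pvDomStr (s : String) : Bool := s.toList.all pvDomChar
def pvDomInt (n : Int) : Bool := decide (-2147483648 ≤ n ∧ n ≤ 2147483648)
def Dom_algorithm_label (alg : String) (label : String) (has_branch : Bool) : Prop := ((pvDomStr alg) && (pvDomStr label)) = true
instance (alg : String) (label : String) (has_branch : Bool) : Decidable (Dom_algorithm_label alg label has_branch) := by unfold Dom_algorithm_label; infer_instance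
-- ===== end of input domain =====

-- B replaces A's label-threading tail recursion by a staged pipeline: the NO_SAVE /
-- NO_BRANCH membership flags are computed ONCE up front (stripping a suffix cannot
-- change them), one loop only strips suffixes recording events, a second fold replays
-- the events into label fragments, and the output is assembled at the end
-- (objective: alternative decomposition).

-- shared constant tables (module-level constants in the Python source)
def pvScalarAlgs : PySem.Dict (List Char) (List Char) := PySem.Dict.ofList
  [("naive_merge".toList, "Merge (branch)".toList),
   ("branchless_merge".toList, "Merge (branchless)".toList)]

def pvVectorAlgs : PySem.Dict (List Char) (List Char) := PySem.Dict.ofList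
  [("qfilter".toList, "QFilter".toList),
   ("qfilter_c".toList, "QFilter (FFI)".toList),
   ("bmiss".toList, "BMiss".toList),
   ("bmiss_sttni".toList, "BMiss STTNI".toList),
   ("shuffling_sse".toList, "Shuffling SSE".toList),
   ("shuffling_avx2".toList, "Shuffling AVX2".toList),
   ("shuffling_avx512".toList, "Shuffling AVX512".toList),
   ("broadcast_sse".toList, "Broadcast SSE".toList),
   ("broadcast_avx2".toList, "Broadcast AVX2".toList),
   ("broadcast_avx512".toList, "Broadcast AVX512".toList),
   ("vp2intersect_emulation".toList, "VP2INT. Emul.".toList),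
   ("croaring".toList, "C Roaring".toList),
   ("lbk_v3_sse".toList, "LBK v3 SSE".toList),
   ("lbk_v3_avx2".toList, "LBK v3 AVX2".toList),
   ("lbk_v3_avx512".toList, "LBK v3 AVX512".toList),
   ("lbk_v1x4_sse".toList, "LBK v1 x4 SSE".toList),
   ("lbk_v1x8_sse".toList, "LBK v1 x8 SSE".toList),
   ("lbk_v1x8_avx2".toList, "LBK v1 x8 AVX2".toList),
   ("lbk_v1x16_avx2".toList, "LBK v1 x16 AVX2".toList),
   ("lbk_v1x16_avx512".toList, "LBK v1 x16 AVX512".toList),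
   ("lbk_v1x32_avx512".toList, "LBK v1 x32 AVX512".toList),
   ("galloping".toList, "Galloping".toList),
   ("galloping_sse".toList, "Galloping SSE".toList),
   ("galloping_avx2".toList, "Galloping AVX2".toList),
   ("galloping_avx512".toList, "Galloping AVX512".toList)]

def pvSaveType : List (List Char × List Char) :=
  [("_count".toList, "count".toList),
   ("_lut".toList, "lookup".toList),
   ("_comp".toList, "compress".toList)]

def pvNoSave : List (List Char) :=
  ["merge".toList, "bmiss".toList, "galloping".toList, "lbk".toList, "croaring".toList]

def pvNoBranch : List (List Char) :=
  ["merge".toList, "galloping".toList, "lbk".toList, "croaring".toList]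

-- the length of alg[:-k] is smaller than alg's when alg ends with a nonempty k-char suffix
theorem pvSliceLenLt (alg p : List Char) (hp : 0 < p.length)
    (h : PySem.Chars.endswith alg p = true) :
    (PySem.List.slice alg none (some (-(p.length : Int)))).length < alg.length := by
  have hsuf : p <:+ alg := (PySem.Chars.endswith_iff alg p).mp h
  have hle : p.length ≤ alg.length := hsuf.length_le
  rw [PySem.List.slice_to_neg_natCast alg (k := p.length) hp]
  simp only [List.length_take]
  omega

-- ===== PORT A =====  (literal port of the recursive Python A; strings as List Char)
def pvAlgLabelA (alg : List Char) (label : List Char) (has_branch : Bool) : List Char :=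
  match pvScalarAlgs.get? alg with
  | some scalar => scalar ++ label
  | none =>
    match pvVectorAlgs.get? alg with
    | some vector =>
      let label :=
        if !has_branch && !(pvNoBranch.any fun x => PySem.Chars.isIn x alg) then
          " (branchless)".toList ++ label
        else label
      vector ++ label
    | none =>
      match hs : pvSaveType.find? (fun pt => PySem.Chars.endswith alg pt.1) with
      | some pt =>
        let rest := PySem.List.slice alg none (some (-(pt.1.length : Int)))
        let tagged :=
          if !(pvNoSave.any fun x => PySem.Chars.isIn x alg) then
            (" (".toList ++ pt.2 ++ ")".toList) ++ label
          else label
        pvAlgLabelA rest tagged has_branch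
      | none =>
        if hbr : PySem.Chars.endswith alg "_br".toList then
          pvAlgLabelA (PySem.List.slice alg none (some (-3))) (" (branch)".toList ++ label) true
        else if hbsr : PySem.Chars.endswith alg "_bsr".toList then
          let label :=
            if !has_branch && !(pvNoBranch.any fun x => PySem.Chars.isIn x alg) then
              " (branchless)".toList ++ label
            else label
          pvAlgLabelA (PySem.List.slice alg none (some (-4))) (" BSR".toList ++ label) true
        else "FAIL: ".toList ++ alg ++ label
termination_by alg.length
decreasing_by
  · have hmem := List.mem_of_find?_eq_some hs
    have hend : PySem.Chars.endswith alg pt.1 = true := by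
      simpa using List.find?_some hs
    have hp : 0 < pt.1.length := by
      fin_cases hmem <;> decide
    exact pvSliceLenLt alg pt.1 hp hend
  · have h3 : (-3 : Int) = -(((3 : Nat) : Int)) := by norm_num
    rw [h3]
    exact pvSliceLenLt alg "_br".toList (by decide) hbr
  · have h4 : (-4 : Int) = -(((4 : Nat) : Int)) := by norm_num
    rw [h4]
    exact pvSliceLenLt alg "_bsr".toList (by decide) hbsr

def algorithm_label (alg : String) (label : String) (has_branch : Bool) : String :=
  String.mk (pvAlgLabelA alg.toList label.toList has_branch)

-- ===== PORT B =====  (literal port of Source B: flags once, strip phase, replay phase, assemble)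
inductive PvEvent
  | save : List Char → PvEvent
  | br : PvEvent
  | bsr : PvEvent
deriving DecidableEq, Repr

-- phase 1 of Source B: the while-loop that only strips suffixes, recording events
def pvStripB (alg : List Char) (events : List PvEvent) : List Char × List PvEvent :=
  if (pvScalarAlgs.get? alg).isSome || (pvVectorAlgs.get? alg).isSome then (alg, events)
  else
    match hs : pvSaveType.find? (fun pt => PySem.Chars.endswith alg pt.1) with
    | some pt =>
      pvStripB (PySem.List.slice alg none (some (-(pt.1.length : Int))))
        (events ++ [PvEvent.save pt.2])
    | none =>
      if hbr : PySem.Chars.endswith alg "_br".toList then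
        pvStripB (PySem.List.slice alg none (some (-3))) (events ++ [PvEvent.br])
      else if hbsr : PySem.Chars.endswith alg "_bsr".toList then
        pvStripB (PySem.List.slice alg none (some (-4))) (events ++ [PvEvent.bsr])
      else (alg, events)
termination_by alg.length
decreasing_by
  · have hmem := List.mem_of_find?_eq_some hs
    have hend : PySem.Chars.endswith alg pt.1 = true := by
      simpa using List.find?_some hs
    have hp : 0 < pt.1.length := by
      fin_cases hmem <;> decide
    exact pvSliceLenLt alg pt.1 hp hend
  · have h3 : (-3 : Int) = -(((3 : Nat) : Int)) := by norm_num
    rw [h3]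
    exact pvSliceLenLt alg "_br".toList (by decide) hbr
  · have h4 : (-4 : Int) = -(((4 : Nat) : Int)) := by norm_num
    rw [h4]
    exact pvSliceLenLt alg "_bsr".toList (by decide) hbsr

-- phase 2 of Source B: replay the events into label fragments plus the final branch flag
def pvReplayB (events : List PvEvent) (no_save no_branch : Bool) (hb : Bool)
    (frags : List (List Char)) : List (List Char) × Bool :=
  match events with
  | [] => (frags, hb)
  | PvEvent.save tag :: rest =>
    pvReplayB rest no_save no_branch hb
      (if !no_save then frags ++ [" (".toList ++ tag ++ ")".toList] else frags)
  | PvEvent.br :: rest =>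
    pvReplayB rest no_save no_branch true (frags ++ [" (branch)".toList])
  | PvEvent.bsr :: rest =>
    pvReplayB rest no_save no_branch true
      ((if !hb && !no_branch then frags ++ [" (branchless)".toList] else frags) ++ [" BSR".toList])

-- phase 3 of Source B: assemble the final label
def pvFinishB (base : List Char) (events : List PvEvent) (no_save no_branch : Bool)
    (hb : Bool) (label : List Char) : List Char :=
  let rh := pvReplayB events no_save no_branch hb []
  let joined := PySem.Chars.join [] rh.1.reverse ++ label
  match pvScalarAlgs.get? base with
  | some s => s ++ joined
  | none =>
    match pvVectorAlgs.get? base with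
    | some v => v ++ (if !rh.2 && !no_branch then " (branchless)".toList else []) ++ joined
    | none => "FAIL: ".toList ++ base ++ joined

def algorithm_label_alt (alg : String) (label : String) (has_branch : Bool) : String :=
  let al := alg.toList
  let no_save := pvNoSave.any fun x => PySem.Chars.isIn x al
  let no_branch := pvNoBranch.any fun x => PySem.Chars.isIn x al
  let se := pvStripB al []
  String.mk (pvFinishB se.1 se.2 no_save no_branch has_branch label.toList)

-- ===== PRECONDITION & SPEC =====
def Spec_algorithm_label (alg : String) (label : String) (has_branch : Bool) (out : String) : Prop := out = algorithm_label_alt alg label has_branch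
instance (alg : String) (label : String) (has_branch : Bool) (out : String) : Decidable (Spec_algorithm_label alg label has_branch out) := by unfold Spec_algorithm_label; infer_instance

-- ===== CLAIM (what is proved, stated in full; the proofs are below) =====
def Claim_equal_algorithm_label : Prop := ∀ (alg : String) (label : String) (has_branch : Bool), Dom_algorithm_label alg label has_branch → Spec_algorithm_label alg label has_branch (algorithm_label alg label has_branch)

-- ===== LEMMAS AND PROOFS =====

-- alg = alg[:-len(p)] ++ p when alg ends with the nonempty p
theorem pvEndswithSplit (alg p : List Char) (k : Int) (hk : k = -(p.length : Int))
    (hp : 0 < p.length) (h : PySem.Chars.endswith alg p = true) :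
    PySem.List.slice alg none (some k) ++ p = alg := by
  obtain ⟨t, ht⟩ := (PySem.Chars.endswith_iff alg p).mp h
  rw [hk, PySem.List.slice_to_neg_natCast alg (k := p.length) hp]
  subst ht
  simp

-- join with empty separator distributes over cons
theorem pvJoinNilCons (t : List Char) (ts : List (List Char)) :
    PySem.Chars.join [] (t :: ts) = t ++ PySem.Chars.join [] ts := by
  simp [PySem.Chars.join]
  cases ts with
  | nil => simp [List.intercalate]
  | cons a l => simp [List.intercalate]

-- a word with no '_' that is not inside the suffix occurs in s ++ sfx iff it occurs in s
-- (sfx starts with '_', so no occurrence can straddle the boundary)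
theorem pvInfixAppendIff (w s sfx : List Char) (hw : '_' ∉ w)
    (hh : sfx.head? = some '_') (hns : ¬ w <:+: sfx) :
    (w <:+: s ++ sfx) ↔ (w <:+: s) := by
  constructor
  · intro h
    induction s with
    | nil => simp only [List.nil_append] at h; exact absurd h hns
    | cons c s ih =>
      rw [List.cons_append, List.infix_cons_iff] at h
      rcases h with h | h
      · rw [List.infix_cons_iff]
        left
        by_cases hlen : w.length ≤ (c :: s).length
        · -- a prefix no longer than c :: s stays inside it
          have : w = ((c :: s) ++ sfx).take w.length := (List.prefix_iff_eq_take).mp (by simpa using h)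
          rw [List.take_append_of_le_length hlen] at this
          rw [this]
          exact List.take_prefix _ _
        · -- w would have to contain the '_' opening sfx
          exfalso
          cases sfx with
          | nil => simp at hh
          | cons d sfx' =>
            have hd : d = '_' := by simpa using hh
            have hpre : w <+: (c :: s) ++ d :: sfx' := by simpa using h
            have hidx : (c :: s).length < w.length := by omega
            have hlt : (c :: s).length < ((c :: s) ++ d :: sfx').length := by
              simp
            have : w[(c :: s).length]'hidx = ((c :: s) ++ d :: sfx')[(c :: s).length]'hlt :=
              hpre.getElem hidx
            rw [List.getElem_append_right (le_refl _)] at this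
            simp [hd] at this
            exact hw (this ▸ List.getElem_mem hidx)
      · exact List.infix_cons_iff.mpr (Or.inr (ih h))
  · intro h
    exact h.trans ⟨[], sfx, by simp⟩

-- stripping one of the suffixes never changes an any(x in alg) membership test
theorem pvIsInInv (w s sfx : List Char) (hw : '_' ∉ w)
    (hh : sfx.head? = some '_') (hns : ¬ w <:+: sfx) :
    PySem.Chars.isIn w (s ++ sfx) = PySem.Chars.isIn w s := by
  by_cases hin : w <:+: s
  · rw [(PySem.Chars.isIn_iff_infix w (s ++ sfx)).mpr ((pvInfixAppendIff w s sfx hw hh hns).mpr hin),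
      (PySem.Chars.isIn_iff_infix w s).mpr hin]
  · have h1 : PySem.Chars.isIn w (s ++ sfx) = false := by
      rw [PySem.Chars.isIn_eq_false_iff]
      intro hc
      exact hin ((pvInfixAppendIff w s sfx hw hh hns).mp hc)
    have h2 : PySem.Chars.isIn w s = false := by
      rw [PySem.Chars.isIn_eq_false_iff]; exact hin
    rw [h1, h2]

theorem pvAnyInv (ws : List (List Char)) (s sfx : List Char)
    (hh : sfx.head? = some '_')
    (hws : ∀ w ∈ ws, '_' ∉ w ∧ ¬ w <:+: sfx) :
    (ws.any fun x => PySem.Chars.isIn x (s ++ sfx)) = (ws.any fun x => PySem.Chars.isIn x s) := by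
  induction ws with
  | nil => rfl
  | cons w rest ih =>
    simp only [List.any_cons]
    obtain ⟨hw1, hw2⟩ := hws w List.mem_cons_self
    rw [ih (fun u hu => hws u (List.mem_cons_of_mem _ hu)), pvIsInInv w s sfx hw1 hh hw2]

-- replaying one more event is one replay step applied at the end
theorem pvReplayAppend (es : List PvEvent) (e : PvEvent) (ns nb hb : Bool)
    (frags : List (List Char)) :
    pvReplayB (es ++ [e]) ns nb hb frags
      = pvReplayB [e] ns nb (pvReplayB es ns nb hb frags).2 (pvReplayB es ns nb hb frags).1 := by
  induction es generalizing hb frags with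
  | nil => rfl
  | cons a rest ih =>
    cases a <;> simp only [List.cons_append, pvReplayB] <;> exact ih _ _

-- main invariant: B's staged pipeline from any intermediate strip state equals
-- A's recursion at that state, with the flags equal to A's current membership tests
theorem pvMain (alg : List Char) (events : List PvEvent) (hb0 : Bool) (label : List Char)
    (ns nb : Bool)
    (hns : (pvNoSave.any fun x => PySem.Chars.isIn x alg) = ns)
    (hnb : (pvNoBranch.any fun x => PySem.Chars.isIn x alg) = nb) :
    pvFinishB (pvStripB alg events).1 (pvStripB alg events).2 ns nb hb0 label
      = pvAlgLabelA alg
          (PySem.Chars.join [] (pvReplayB events ns nb hb0 []).1.reverse ++ label)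
          (pvReplayB events ns nb hb0 []).2 := by
  rw [pvStripB.eq_def, pvAlgLabelA.eq_def]
  by_cases hdict : ((pvScalarAlgs.get? alg).isSome || (pvVectorAlgs.get? alg).isSome) = true
  · -- dict hit: strip loop stops, assemble
    simp only [hdict, if_true]
    rw [pvFinishB]
    cases h1 : pvScalarAlgs.get? alg with
    | some s => simp only [List.append_assoc]
    | none =>
      cases h2 : pvVectorAlgs.get? alg with
      | some v =>
        rw [hnb]
        by_cases hc : ((pvReplayB events ns nb hb0 []).2 = true)
        · simp [hc]
        · simp only [Bool.not_eq_true] at hc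
          by_cases hnb2 : nb = true
          · simp [hnb2]
          · simp only [Bool.not_eq_true] at hnb2
            subst hnb2
            simp [hc, List.append_assoc]
      | none => simp [h1, h2] at hdict
  · simp only [hdict]
    have hsc : pvScalarAlgs.get? alg = none := by
      cases h : pvScalarAlgs.get? alg with
      | none => rfl
      | some s => simp [h] at hdict
    have hvc : pvVectorAlgs.get? alg = none := by
      cases h : pvVectorAlgs.get? alg with
      | none => rfl
      | some s => simp [h] at hdict
    simp only [hsc, hvc]
    cases hs : pvSaveType.find? (fun pt => PySem.Chars.endswith alg pt.1) with
    | some pt =>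
      -- save-suffix strip step
      simp only [Bool.false_eq_true, if_false]
      have hend : PySem.Chars.endswith alg pt.1 = true := by
        simpa using List.find?_some hs
      have hmem := List.mem_of_find?_eq_some hs
      have hp : 0 < pt.1.length := by fin_cases hmem <;> decide
      have hsplit := pvEndswithSplit alg pt.1 _ rfl hp hend
      have hcond : (∀ w ∈ pvNoSave, '_' ∉ w ∧ ¬ w <:+: pt.1) ∧
          (∀ w ∈ pvNoBranch, '_' ∉ w ∧ ¬ w <:+: pt.1) ∧ pt.1.head? = some '_' := by
        fin_cases hmem <;> exact ⟨by decide, by decide, by decide⟩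
      have hinvs := pvAnyInv pvNoSave (PySem.List.slice alg none (some (-(pt.1.length : Int)))) pt.1 hcond.2.2 hcond.1
      have hinvb := pvAnyInv pvNoBranch (PySem.List.slice alg none (some (-(pt.1.length : Int)))) pt.1 hcond.2.2 hcond.2.1
      rw [hsplit] at hinvs hinvb
      have hns' : (pvNoSave.any fun x =>
          PySem.Chars.isIn x (PySem.List.slice alg none (some (-(pt.1.length : Int))))) = ns := by
        rw [← hinvs]; exact hns
      have hnb' : (pvNoBranch.any fun x =>
          PySem.Chars.isIn x (PySem.List.slice alg none (some (-(pt.1.length : Int))))) = nb := by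
        rw [← hinvb]; exact hnb
      rw [pvMain _ _ hb0 label ns nb hns' hnb', pvReplayAppend]
      simp only [pvReplayB, hns]
      by_cases hcs : ns = true
      · simp [hcs]
      · simp only [Bool.not_eq_true] at hcs
        simp [hcs, pvJoinNilCons, List.append_assoc]
    | none =>
      simp only [Bool.false_eq_true, if_false]
      by_cases hbr : PySem.Chars.endswith alg "_br".toList = true
      · -- "_br" strip step
        simp only [hbr, dif_pos]
        have hsplit := pvEndswithSplit alg "_br".toList (-3) (by decide) (by decide) hbr
        have hinvs := pvAnyInv pvNoSave (PySem.List.slice alg none (some (-3))) "_br".toList (by decide) (by decide)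
        have hinvb := pvAnyInv pvNoBranch (PySem.List.slice alg none (some (-3))) "_br".toList (by decide) (by decide)
        rw [hsplit] at hinvs hinvb
        have hns' : (pvNoSave.any fun x =>
            PySem.Chars.isIn x (PySem.List.slice alg none (some (-3)))) = ns := by
          rw [← hinvs]; exact hns
        have hnb' : (pvNoBranch.any fun x =>
            PySem.Chars.isIn x (PySem.List.slice alg none (some (-3)))) = nb := by
          rw [← hinvb]; exact hnb
        rw [pvMain _ _ hb0 label ns nb hns' hnb', pvReplayAppend]
        simp only [pvReplayB]
        simp [pvJoinNilCons]
      · simp only [hbr, dif_neg, Bool.not_eq_true]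
        by_cases hbsr : PySem.Chars.endswith alg "_bsr".toList = true
        · -- "_bsr" strip step
          simp only [hbsr, dif_pos]
          have hsplit := pvEndswithSplit alg "_bsr".toList (-4) (by decide) (by decide) hbsr
          have hinvs := pvAnyInv pvNoSave (PySem.List.slice alg none (some (-4))) "_bsr".toList (by decide) (by decide)
          have hinvb := pvAnyInv pvNoBranch (PySem.List.slice alg none (some (-4))) "_bsr".toList (by decide) (by decide)
          rw [hsplit] at hinvs hinvb
          have hns' : (pvNoSave.any fun x =>
              PySem.Chars.isIn x (PySem.List.slice alg none (some (-4)))) = ns := by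
            rw [← hinvs]; exact hns
          have hnb' : (pvNoBranch.any fun x =>
              PySem.Chars.isIn x (PySem.List.slice alg none (some (-4)))) = nb := by
            rw [← hinvb]; exact hnb
          rw [pvMain _ _ hb0 label ns nb hns' hnb', pvReplayAppend]
          simp only [pvReplayB, hnb]
          by_cases hcb : ((pvReplayB events ns nb hb0 []).2 = true)
          · simp [hcb, pvJoinNilCons, List.append_assoc]
          · simp only [Bool.not_eq_true] at hcb
            by_cases hnb2 : nb = true
            · simp [hnb2, pvJoinNilCons, List.append_assoc]
            · simp only [Bool.not_eq_true] at hnb2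
              subst hnb2
              simp [hcb, pvJoinNilCons, List.append_assoc]
        · -- nothing matches: FAIL
          simp only [hbsr, dif_neg, Bool.not_eq_true]
          rw [pvFinishB]
          simp only [hsc, hvc, List.append_assoc]
termination_by alg.length
decreasing_by
  all_goals first
    | exact pvSliceLenLt alg pt.1
        (by have hmem := List.mem_of_find?_eq_some hs; fin_cases hmem <;> decide)
        (by simpa using List.find?_some hs)
    | (rw [show (-3 : Int) = -(((3 : Nat) : Int)) by norm_num]
       exact pvSliceLenLt alg "_br".toList (by decide) hbr)
    | (rw [show (-4 : Int) = -(((4 : Nat) : Int)) by norm_num]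
       exact pvSliceLenLt alg "_bsr".toList (by decide) hbsr)

-- ===== VERDICT (by name: the statement is the Claim_ definition above) =====
theorem algorithm_label_spec : Claim_equal_algorithm_label := by
  intro alg label hb _
  unfold Spec_algorithm_label algorithm_label algorithm_label_alt
  dsimp only
  rw [pvMain alg.toList [] hb label.toList _ _ rfl rfl]
  simp [pvReplayB, PySem.Chars.join, List.intercalate]
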